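-- pv_equiv track=rewrite | github.com/custodiaserrana-lab/Sistema-de-Apuestas-deportivas | main_bot.py | buscar_rating
-- ===== SOURCE A (Python) =====
-- def buscar_rating(nombre, ratings):
--     n = nombre.strip().lower()
--     for eq, r in ratings.items():
--         if eq.strip().lower() == n:
--             return r
--     for eq, r in ratings.items():
--         eq_n = eq.strip().lower()
--         if n in eq_n or eq_n in n:
--             return r
--     return None
-- ===== SOURCE B (Python) =====
-- def buscar_rating(nombre, ratings):
--     n = nombre.strip().lower()
--     fallback = None
--     for eq, r in ratings.items():
--         eq_n = eq.strip().lower()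
--         if eq_n == n:
--             return r
--         if fallback is None and (n in eq_n or eq_n in n):
--             fallback = r
--     return fallback
-- ===== Notes on version B (the rewrite author's own statement) =====
-- stated objective: simpler
-- what changed: Fuses A's two scans over ratings into a single pass that returns immediately on the first exact normalized match and records the first substring match as a fallback returned after the loop.
import Mathlib
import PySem

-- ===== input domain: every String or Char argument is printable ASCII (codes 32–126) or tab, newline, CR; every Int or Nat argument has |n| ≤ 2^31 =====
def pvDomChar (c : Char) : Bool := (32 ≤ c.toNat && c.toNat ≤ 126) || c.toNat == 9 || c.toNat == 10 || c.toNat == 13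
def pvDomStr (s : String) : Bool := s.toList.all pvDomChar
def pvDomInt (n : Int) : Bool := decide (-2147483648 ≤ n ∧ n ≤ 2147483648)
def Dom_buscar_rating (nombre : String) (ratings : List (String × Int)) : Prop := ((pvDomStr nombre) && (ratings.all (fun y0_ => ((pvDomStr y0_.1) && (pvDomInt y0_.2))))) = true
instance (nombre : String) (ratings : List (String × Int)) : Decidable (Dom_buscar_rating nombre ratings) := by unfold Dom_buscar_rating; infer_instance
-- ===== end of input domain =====

-- B fuses A's two scans over the ratings into one pass (exact match returns at once,
-- first substring match is kept as a fallback); same return value, simpler single pass.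
-- ===== PORT A =====
-- eq.strip().lower()
def pvNorm (s : String) : String := PySem.Str.lower (PySem.Str.strip s)

-- A's first loop: first exact normalized match
def pvLoopExact (n : String) : List (String × Int) → Option Int
  | [] => none
  | (eq, r) :: rest => if pvNorm eq = n then some r else pvLoopExact n rest

-- A's second loop: first substring match (either direction)
def pvLoopSub (n : String) : List (String × Int) → Option Int
  | [] => none
  | (eq, r) :: rest =>
    let eq_n := pvNorm eq
    if PySem.Str.isIn n eq_n || PySem.Str.isIn eq_n n then some r else pvLoopSub n rest

def buscar_rating (nombre : String) (ratings : List (String × Int)) : Option Int :=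
  let n := pvNorm nombre
  match pvLoopExact n ratings with
  | some r => some r
  | none => pvLoopSub n ratings

-- ===== PORT B =====
-- B's single fused loop carrying the fallback
def pvLoopFused (n : String) (fallback : Option Int) : List (String × Int) → Option Int
  | [] => fallback
  | (eq, r) :: rest =>
    let eq_n := pvNorm eq
    if eq_n = n then some r
    else
      pvLoopFused n
        (if fallback.isNone && (PySem.Str.isIn n eq_n || PySem.Str.isIn eq_n n)
         then some r else fallback) rest

def buscar_rating_alt (nombre : String) (ratings : List (String × Int)) : Option Int :=
  pvLoopFused (pvNorm nombre) none ratings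

-- ===== PRECONDITION & SPEC =====
def Spec_buscar_rating (nombre : String) (ratings : List (String × Int)) (out : Option Int) : Prop := out = buscar_rating_alt nombre ratings
instance (nombre : String) (ratings : List (String × Int)) (out : Option Int) : Decidable (Spec_buscar_rating nombre ratings out) := by unfold Spec_buscar_rating; infer_instance

-- ===== CLAIM (what is proved, stated in full; the proofs are below) =====
def Claim_equal_buscar_rating : Prop := ∀ (nombre : String) (ratings : List (String × Int)), Dom_buscar_rating nombre ratings → Spec_buscar_rating nombre ratings (buscar_rating nombre ratings)

-- ===== LEMMAS AND PROOFS =====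
-- The fused loop equals: first exact match, else the fallback, else the first substring match.
theorem pvLoopFused_eq (n : String) (fb : Option Int) (l : List (String × Int)) :
    pvLoopFused n fb l =
      ((pvLoopExact n l).or (fb.or (pvLoopSub n l))) := by
  induction l generalizing fb with
  | nil => simp [pvLoopFused, pvLoopExact, pvLoopSub]
  | cons p rest ih =>
    obtain ⟨eq, r⟩ := p
    by_cases hx : pvNorm eq = n
    · simp [pvLoopFused, pvLoopExact, hx]
    · simp only [pvLoopFused, pvLoopExact, pvLoopSub, hx, if_false, ih]
      cases fb <;> simp <;> split_ifs <;> simp_all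

-- ===== VERDICT (by name: the statement is the Claim_ definition above) =====
theorem buscar_rating_spec : Claim_equal_buscar_rating := by
  intro nombre ratings _
  unfold Spec_buscar_rating buscar_rating buscar_rating_alt
  rw [pvLoopFused_eq]
  cases h : pvLoopExact (pvNorm nombre) ratings <;> simp [h]
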